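-- pv_equiv track=rewrite | github.com/charlesreiss/cachelab | quiz/models.py | _can_find_parameters_from
-- ===== SOURCE A (Python) =====
-- all_cache_question_parameters = [
--     'tag_bits',
--     'index_bits',
--     'offset_bits',
--     'cache_size_bytes',
--     'num_sets',
--     'num_ways',
--     'block_size',
--     'set_size_bytes',
--     'way_size_bytes',
--     'address_bits',
-- ]
--
-- def _can_find_parameters_from(given_parts):
--     known_parts = given_parts
--     done = False
--     equations = [
--         set(['block_size', 'offset_bits']),
--         set(['index_bits', 'num_sets']),
--         set(['block_size', 'set_size_bytes', 'num_ways']),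
--         set(['block_size', 'num_ways', 'num_sets', 'cache_size_bytes']),
--         set(['tag_bits', 'index_bits', 'offset_bits', 'address_bits']),
--     ]
--     while not done:
--         done = True
--         for equation in equations:
--             if len(known_parts & equation) == len(equation) - 1:
--                 known_parts |= equation
--                 done = False
--     return len(known_parts) == len(all_cache_question_parameters)
-- ===== SOURCE B (Python) =====
-- # Worklist closure: instead of re-sweeping all equations until a full pass makes
-- # no progress, keep a stack of parts just learned and, for each popped part,
-- # examine only the equations containing it; mutates given_parts in place like A.
-- all_cache_question_parameters = [
--     'tag_bits',
--     'index_bits',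
--     'offset_bits',
--     'cache_size_bytes',
--     'num_sets',
--     'num_ways',
--     'block_size',
--     'set_size_bytes',
--     'way_size_bytes',
--     'address_bits',
-- ]
--
-- def _can_find_parameters_from(given_parts):
--     equations = [
--         set(['block_size', 'offset_bits']),
--         set(['index_bits', 'num_sets']),
--         set(['block_size', 'set_size_bytes', 'num_ways']),
--         set(['block_size', 'num_ways', 'num_sets', 'cache_size_bytes']),
--         set(['tag_bits', 'index_bits', 'offset_bits', 'address_bits']),
--     ]
--     queue = list(given_parts)
--     while queue:
--         part = queue.pop()
--         for equation in equations:
--             if part in equation: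
--                 missing = equation - given_parts
--                 if len(missing) == 1:
--                     given_parts |= missing
--                     queue.extend(missing)
--     return len(given_parts) == len(all_cache_question_parameters)
-- ===== Notes on version B (the rewrite author's own statement) =====
-- stated objective: alternative
-- what changed: Replaces A's repeated full sweeps over all equations until a pass makes no progress with a worklist closure: a stack of newly-learned parts is popped one at a time and only the equations containing the popped part are examined, deriving the single missing member and pushing it; both mutate given_parts in place and return len(given_parts)==10.
import Mathlib
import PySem

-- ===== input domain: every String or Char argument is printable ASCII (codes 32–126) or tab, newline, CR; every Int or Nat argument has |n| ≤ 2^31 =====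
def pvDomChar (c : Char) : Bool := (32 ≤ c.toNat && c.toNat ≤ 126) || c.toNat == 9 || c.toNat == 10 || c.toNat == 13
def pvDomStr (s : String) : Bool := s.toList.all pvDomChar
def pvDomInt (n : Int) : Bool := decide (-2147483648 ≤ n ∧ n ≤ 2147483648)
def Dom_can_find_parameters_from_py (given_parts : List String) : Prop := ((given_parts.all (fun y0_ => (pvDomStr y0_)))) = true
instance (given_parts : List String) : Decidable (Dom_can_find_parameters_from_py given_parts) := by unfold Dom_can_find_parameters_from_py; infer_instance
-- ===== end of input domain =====

-- B replaces A's sweep-until-stable fixpoint with a worklist closure (stack of newly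
-- learned parts, scanning only the equations containing the popped part); same result.
-- Both Pythons mutate given_parts in place identically (they |= the same closure into it);
-- the equivalence proved here is about the return value.

-- ===== PORT A =====
def pvAllParams : List String :=
  ["tag_bits", "index_bits", "offset_bits", "cache_size_bytes", "num_sets",
   "num_ways", "block_size", "set_size_bytes", "way_size_bytes", "address_bits"]

def pvEquations : List (PySem.Set String) :=
  [PySem.Set.ofList ["block_size", "offset_bits"],
   PySem.Set.ofList ["index_bits", "num_sets"],
   PySem.Set.ofList ["block_size", "set_size_bytes", "num_ways"],
   PySem.Set.ofList ["block_size", "num_ways", "num_sets", "cache_size_bytes"],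
   PySem.Set.ofList ["tag_bits", "index_bits", "offset_bits", "address_bits"]]

-- union of all equation members (proof/termination helper, not part of either Python)
def pvU : List String :=
  ["block_size", "offset_bits", "index_bits", "num_sets", "set_size_bytes",
   "num_ways", "cache_size_bytes", "tag_bits", "address_bits"]

-- number of equation members not yet known (termination measure for both loops)
def pvMiss (known : List String) : Nat := (pvU.filter (fun x => !known.contains x)).length

-- `len(known_parts & equation) == len(equation) - 1`
def pvFire (known e : PySem.Set String) : Bool :=
  (PySem.Set.inter known e).length == e.length - 1

-- one pass of `for equation in equations: ...` with the `done` flag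
def pvSweepA (known : PySem.Set String) : PySem.Set String × Bool :=
  pvEquations.foldl
    (fun st e => if pvFire st.1 e then (PySem.Set.union st.1 e, false) else st)
    (known, true)

lemma pv_eq_facts : ∀ e ∈ pvEquations, e.Nodup ∧ e ≠ [] ∧ ∀ x ∈ e, x ∈ pvU := by decide

lemma pvMiss_lt_aux (l : List String) (known k' : List String)
    (hmono : ∀ a ∈ known, a ∈ k') (x : String) (hx : x ∈ l) (h1 : x ∉ known) (h2 : x ∈ k') :
    (l.filter (fun a => !k'.contains a)).length < (l.filter (fun a => !known.contains a)).length := by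
  induction l with
  | nil => simp at hx
  | cons a l ih =>
      have hstep : ∀ (b : String), (!k'.contains b) = true → (!known.contains b) = true := by
        intro b hb
        simp only [Bool.not_eq_eq_eq_not, Bool.not_true, List.contains_eq_mem,
          decide_eq_false_iff_not] at hb ⊢
        exact fun hmem => hb (hmono b hmem)
      have hmonoLen : (l.filter (fun a => !k'.contains a)).length ≤
          (l.filter (fun a => !known.contains a)).length := by
        rw [← List.countP_eq_length_filter, ← List.countP_eq_length_filter]
        exact List.countP_mono_left (fun b hb => hstep b)
      rcases List.mem_cons.mp hx with rfl | hx'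
      · have hk' : (!k'.contains x) = false := by
          simp [List.contains_eq_mem, h2]
        have hkn : (!known.contains x) = true := by
          simp [List.contains_eq_mem, h1]
        simp only [List.filter_cons, hk', hkn]
        simpa using Nat.lt_succ_of_le hmonoLen
      · have := ih hx'
        simp only [List.filter_cons]
        by_cases hk : (!k'.contains a) = true
        · rw [if_pos hk, if_pos (hstep a hk)]
          simpa using Nat.succ_lt_succ this
        · rw [if_neg hk]
          split
          · exact Nat.lt_succ_of_lt this
          · exact this

lemma pvMiss_lt {known k' : List String} (hmono : ∀ a ∈ known, a ∈ k')
    {x : String} (hxU : x ∈ pvU) (h1 : x ∉ known) (h2 : x ∈ k') :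
    pvMiss k' < pvMiss known :=
  pvMiss_lt_aux pvU known k' hmono x hxU h1 h2

lemma pv_inter_length_ge (known e : List String) (he : e.Nodup)
    (hsub : ∀ x ∈ e, x ∈ known) : e.length ≤ (PySem.Set.inter known e).length := by
  have h1 : e.toFinset ⊆ (PySem.Set.inter known e).toFinset := by
    intro x hx
    rw [List.mem_toFinset] at hx ⊢
    unfold PySem.Set.inter
    rw [List.mem_filter]
    exact ⟨hsub x hx, by simp [List.contains_eq_mem, hx]⟩
  calc e.length = e.toFinset.card := (List.toFinset_card_of_nodup he).symm
    _ ≤ (PySem.Set.inter known e).toFinset.card := Finset.card_le_card h1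
    _ ≤ (PySem.Set.inter known e).length := List.toFinset_card_le _

lemma pv_fire_not_subset {known e : List String} (he : e.Nodup) (hne : e ≠ [])
    (hf : pvFire known e = true) : ∃ x ∈ e, x ∉ known := by
  by_contra hall
  push Not at hall
  have hge := pv_inter_length_ge known e he hall
  have : (PySem.Set.inter known e).length = e.length - 1 := by
    simpa [pvFire] using hf
  have hpos : 0 < e.length := List.length_pos_iff.mpr hne
  omega

lemma pvFoldA_progress (eqs : List (PySem.Set String))
    (h : ∀ e ∈ eqs, e.Nodup ∧ e ≠ [] ∧ ∀ x ∈ e, x ∈ pvU) :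
    ∀ (known : List String) (d : Bool),
    (∀ x ∈ known, x ∈ (eqs.foldl
        (fun st e => if pvFire st.1 e then (PySem.Set.union st.1 e, false) else st) (known, d)).1) ∧
      ((eqs.foldl
        (fun st e => if pvFire st.1 e then (PySem.Set.union st.1 e, false) else st) (known, d)).2 = false →
        d = false ∨ ∃ x ∈ pvU, x ∉ known ∧ x ∈ (eqs.foldl
        (fun st e => if pvFire st.1 e then (PySem.Set.union st.1 e, false) else st) (known, d)).1) := by
  induction eqs with
  | nil =>
      intro known d
      simp only [List.foldl_nil]
      exact ⟨fun x hx => hx, fun h2 => Or.inl h2⟩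
  | cons e eqs ih =>
      intro known d
      obtain ⟨hnd, hne, hU⟩ := h e (by simp)
      have ih' := ih (fun e' he' => h e' (by simp [he']))
      simp only [List.foldl_cons]
      by_cases hf : pvFire known e = true
      · rw [if_pos hf]
        obtain ⟨hmono, _⟩ := ih' (PySem.Set.union known e) false
        refine ⟨fun x hx => hmono x ((PySem.Set.mem_union known e x).mpr (Or.inl hx)), fun _ => ?_⟩
        obtain ⟨x, hxe, hxk⟩ := pv_fire_not_subset hnd hne hf
        exact Or.inr ⟨x, hU x hxe, hxk,
          hmono x ((PySem.Set.mem_union known e x).mpr (Or.inr hxe))⟩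
      · rw [if_neg hf]
        exact ih' known d

lemma pvSweep_progress (known : List String) (h : (pvSweepA known).2 = false) :
    pvMiss (pvSweepA known).1 < pvMiss known := by
  obtain ⟨hmono, hex⟩ := pvFoldA_progress pvEquations pv_eq_facts known true
  rcases hex h with hd | ⟨x, hxU, h1, h2⟩
  · simp at hd
  · exact pvMiss_lt hmono hxU h1 h2

-- `while not done:` loop of A
def pvLoopA (known : PySem.Set String) : PySem.Set String :=
  let r := pvSweepA known
  if r.2 then r.1 else pvLoopA r.1
termination_by pvMiss known
decreasing_by
  rename_i hdone
  exact pvSweep_progress known (by simpa using hdone)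

def can_find_parameters_from_py (given_parts : List String) : Bool :=
  (pvLoopA given_parts).length == pvAllParams.length

-- ===== PORT B =====
-- one `for equation in equations:` body of Source B, for the popped part;
-- state = (given_parts, queue); the queue is kept top-first (pop() = head, extend = cons)
def pvStepB (part : String) (st : PySem.Set String × List String) (e : PySem.Set String) :
    PySem.Set String × List String :=
  if e.contains part then
    let missing := PySem.Set.diff e st.1
    if missing.length == 1 then (PySem.Set.union st.1 missing, missing ++ st.2) else st
  else st

lemma pvStepB_fire {part : String} {st : PySem.Set String × List String}
    {e : PySem.Set String} (hc : e.contains part = true)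
    (hlen : ((PySem.Set.diff e st.1).length == 1) = true) :
    pvStepB part st e =
      (PySem.Set.union st.1 (PySem.Set.diff e st.1), PySem.Set.diff e st.1 ++ st.2) := by
  unfold pvStepB
  rw [if_pos hc, if_pos hlen]

lemma pvStepB_skip {part : String} {st : PySem.Set String × List String}
    {e : PySem.Set String}
    (h : e.contains part = false ∨ ((PySem.Set.diff e st.1).length == 1) = false) :
    pvStepB part st e = st := by
  unfold pvStepB
  rcases h with h | h
  · rw [if_neg (by rw [h]; decide)]
  · by_cases hc : e.contains part = true
    · rw [if_pos hc, if_neg (by simp [h])]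
    · rw [if_neg hc]

lemma pvFoldB_measure (eqs : List (PySem.Set String))
    (h : ∀ e ∈ eqs, ∀ x ∈ e, x ∈ pvU) (part : String) :
    ∀ (g : List String) (s : List String),
    (∀ x ∈ g, x ∈ (eqs.foldl (pvStepB part) (g, s)).1) ∧
      (eqs.foldl (pvStepB part) (g, s)).2.length +
        2 * pvMiss (eqs.foldl (pvStepB part) (g, s)).1 ≤ s.length + 2 * pvMiss g := by
  induction eqs with
  | nil =>
      intro g s
      simp only [List.foldl_nil]
      exact ⟨fun x hx => hx, le_refl _⟩
  | cons e eqs ih =>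
      intro g s
      have hU := h e (by simp)
      have ih' := ih (fun e' he' => h e' (by simp [he']))
      simp only [List.foldl_cons]
      by_cases hc : e.contains part = true
      · by_cases hlen : ((PySem.Set.diff e g).length == 1) = true
        · rw [show pvStepB part (g, s) e =
            (PySem.Set.union g (PySem.Set.diff e g), PySem.Set.diff e g ++ s) from
            pvStepB_fire hc hlen]
          obtain ⟨m, hm⟩ := List.length_eq_one_iff.mp (by simpa using hlen)
          have hmem : m ∈ PySem.Set.diff e g := by simp [hm]
          have hme : m ∈ e ∧ m ∉ g := by
            unfold PySem.Set.diff at hmem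
            rw [List.mem_filter] at hmem
            exact ⟨hmem.1, by simpa [List.contains_eq_mem] using hmem.2⟩
          have hmono1 : ∀ x ∈ g, x ∈ PySem.Set.union g (PySem.Set.diff e g) :=
            fun x hx => (PySem.Set.mem_union _ _ x).mpr (Or.inl hx)
          have hmU : m ∈ PySem.Set.union g (PySem.Set.diff e g) :=
            (PySem.Set.mem_union _ _ m).mpr (Or.inr hmem)
          have hlt : pvMiss (PySem.Set.union g (PySem.Set.diff e g)) < pvMiss g :=
            pvMiss_lt hmono1 (hU m hme.1) hme.2 hmU
          obtain ⟨hmono2, hmeas⟩ := ih' (PySem.Set.union g (PySem.Set.diff e g))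
            (PySem.Set.diff e g ++ s)
          refine ⟨fun x hx => hmono2 x (hmono1 x hx), ?_⟩
          have hlens : (PySem.Set.diff e g ++ s).length = s.length + 1 := by simp [hm]
          omega
        · rw [show pvStepB part (g, s) e = (g, s) from
            pvStepB_skip (Or.inr (by simpa using hlen))]
          exact ih' g s
      · rw [show pvStepB part (g, s) e = (g, s) from
          pvStepB_skip (Or.inl (by simpa using hc))]
        exact ih' g s

-- `while queue:` loop of Source B; the stack holds the queue top-first
def pvLoopB (given : PySem.Set String) : List String → PySem.Set String
  | [] => given
  | part :: rest =>
      let r := pvEquations.foldl (pvStepB part) (given, rest)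
      pvLoopB r.1 r.2
termination_by stack => stack.length + 2 * pvMiss given
decreasing_by
  have hm := (pvFoldB_measure pvEquations
    (fun e he x hx => (pv_eq_facts e he).2.2 x hx) part given rest).2
  simp only [List.length_cons]
  omega

def can_find_parameters_from_py_alt (given_parts : List String) : Bool :=
  (pvLoopB given_parts given_parts.reverse).length == pvAllParams.length

-- ===== PRECONDITION & SPEC =====
-- The Python parameter is a set; its List representation holds distinct elements, so
-- Pre_ is exactly that representation invariant (no input A returns on is excluded).
def Pre_can_find_parameters_from_py (given_parts : List String) : Prop := given_parts.Nodup
instance (given_parts : List String) : Decidable (Pre_can_find_parameters_from_py given_parts) := by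
  unfold Pre_can_find_parameters_from_py; infer_instance

def pvWitness_can_find_parameters_from_py : List String := ["block_size", "offset_bits"]

def Spec_can_find_parameters_from_py (given_parts : List String) (out : Bool) : Prop := out = can_find_parameters_from_py_alt given_parts
instance (given_parts : List String) (out : Bool) : Decidable (Spec_can_find_parameters_from_py given_parts out) := by unfold Spec_can_find_parameters_from_py; infer_instance

-- ===== CLAIM (what is proved, stated in full; the proofs are below) =====
def Claim_equal_can_find_parameters_from_py : Prop := ∀ (given_parts : List String), Dom_can_find_parameters_from_py given_parts → Pre_can_find_parameters_from_py given_parts → Spec_can_find_parameters_from_py given_parts (can_find_parameters_from_py given_parts)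

-- ===== LEMMAS AND PROOFS =====

-- Both loops compute the LEAST superset of the input closed under the equations
-- (if all but one member of an equation are known, so is the last); the two results
-- therefore have the same members, and being Nodup, the same length.
def pvClosed (K : List String) : Prop :=
  ∀ e ∈ pvEquations, ∀ x ∈ e, (∀ y ∈ e, y ≠ x → y ∈ K) → x ∈ K

lemma pv_eq_facts2 : ∀ e ∈ pvEquations, ∀ x ∈ e, ∃ y ∈ e, y ≠ x := by decide

lemma pv_inter_card (known e : List String) (hk : known.Nodup) :
    (PySem.Set.inter known e).length = (known.toFinset ∩ e.toFinset).card := by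
  have hnd : (PySem.Set.inter known e).Nodup := hk.filter _
  rw [← List.toFinset_card_of_nodup hnd]
  congr 1
  unfold PySem.Set.inter
  rw [List.toFinset_filter]
  ext x
  simp [List.contains_eq_mem]

lemma pv_closed_of_nofire (known : List String) (hk : known.Nodup)
    (h : ∀ e ∈ pvEquations, pvFire known e = false) : pvClosed known := by
  intro e he x hx hall
  obtain ⟨hnd, hne, _⟩ := pv_eq_facts e he
  have hcard := pv_inter_card known e hk
  have hBcard : e.toFinset.card = e.length := List.toFinset_card_of_nodup hnd
  have herase : e.toFinset.erase x ⊆ known.toFinset ∩ e.toFinset := by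
    intro y hy
    rw [Finset.mem_erase] at hy
    rw [Finset.mem_inter, List.mem_toFinset, List.mem_toFinset]
    have hye : y ∈ e := List.mem_toFinset.mp hy.2
    exact ⟨hall y hye hy.1, hye⟩
  have hle : e.toFinset.card - 1 ≤ (known.toFinset ∩ e.toFinset).card := by
    have := Finset.card_le_card herase
    rwa [Finset.card_erase_of_mem (List.mem_toFinset.mpr hx)] at this
  have hub : (known.toFinset ∩ e.toFinset).card ≤ e.toFinset.card :=
    Finset.card_le_card Finset.inter_subset_right
  have hnf : (PySem.Set.inter known e).length ≠ e.length - 1 := by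
    have := h e he
    simpa [pvFire] using this
  have hpos : 0 < e.length := List.length_pos_iff.mpr hne
  have heq : (known.toFinset ∩ e.toFinset).card = e.toFinset.card := by omega
  have : known.toFinset ∩ e.toFinset = e.toFinset :=
    Finset.eq_of_subset_of_card_le Finset.inter_subset_right (le_of_eq heq.symm)
  have hsubB : e.toFinset ⊆ known.toFinset := by
    rw [← Finset.inter_eq_right]; exact this
  exact List.mem_toFinset.mp (hsubB (List.mem_toFinset.mpr hx))

lemma pv_fire_missing (known e : List String) (hk : known.Nodup) (hnd : e.Nodup)
    (hne : e ≠ []) (hf : pvFire known e = true) :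
    ∃ x ∈ e, x ∉ known ∧ ∀ y ∈ e, y ≠ x → y ∈ known := by
  have hcard := pv_inter_card known e hk
  have hBcard : e.toFinset.card = e.length := List.toFinset_card_of_nodup hnd
  have hfl : (PySem.Set.inter known e).length = e.length - 1 := by
    simpa [pvFire] using hf
  have hsplit : (e.toFinset ∩ known.toFinset).card + (e.toFinset \ known.toFinset).card
      = e.toFinset.card := Finset.card_inter_add_card_sdiff _ _
  rw [Finset.inter_comm] at hsplit
  have hpos : 0 < e.length := List.length_pos_iff.mpr hne
  have hone : (e.toFinset \ known.toFinset).card = 1 := by omega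
  obtain ⟨x, hxeq⟩ := Finset.card_eq_one.mp hone
  have hxmem : x ∈ e.toFinset \ known.toFinset := hxeq ▸ Finset.mem_singleton_self x
  rw [Finset.mem_sdiff, List.mem_toFinset, List.mem_toFinset] at hxmem
  refine ⟨x, hxmem.1, hxmem.2, fun y hy hyx => ?_⟩
  by_contra hyk
  have : y ∈ e.toFinset \ known.toFinset := by
    rw [Finset.mem_sdiff, List.mem_toFinset, List.mem_toFinset]
    exact ⟨hy, hyk⟩
  rw [hxeq, Finset.mem_singleton] at this
  exact hyx this

lemma pvFoldA_main (eqs : List (PySem.Set String)) (hsub : ∀ e ∈ eqs, e ∈ pvEquations) :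
    ∀ (known : List String) (d : Bool), known.Nodup →
    (eqs.foldl
        (fun st e => if pvFire st.1 e then (PySem.Set.union st.1 e, false) else st)
        (known, d)).1.Nodup ∧
    (∀ x ∈ known, x ∈ (eqs.foldl
        (fun st e => if pvFire st.1 e then (PySem.Set.union st.1 e, false) else st)
        (known, d)).1) ∧
    (∀ M, pvClosed M → (∀ x ∈ known, x ∈ M) → ∀ x ∈ (eqs.foldl
        (fun st e => if pvFire st.1 e then (PySem.Set.union st.1 e, false) else st)
        (known, d)).1, x ∈ M) := by
  induction eqs with
  | nil =>
      intro known d hk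
      simp only [List.foldl_nil]
      exact ⟨hk, fun x hx => hx, fun M _ hM x hx => hM x hx⟩
  | cons e eqs ih =>
      intro known d hk
      have hein := hsub e (by simp)
      obtain ⟨hnd, hne, _⟩ := pv_eq_facts e hein
      have ih' := ih (fun e' he' => hsub e' (by simp [he']))
      simp only [List.foldl_cons]
      by_cases hf : pvFire known e = true
      · rw [if_pos hf]
        obtain ⟨x, hxe, hxk, hall⟩ := pv_fire_missing known e hk hnd hne hf
        have hk' : (PySem.Set.union known e).Nodup := PySem.Set.nodup_union known e hk
        obtain ⟨h1, h2, h3⟩ := ih' (PySem.Set.union known e) false hk'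
        refine ⟨h1, fun y hy => h2 y ((PySem.Set.mem_union known e y).mpr (Or.inl hy)), ?_⟩
        intro M hMc hMk
        refine h3 M hMc ?_
        intro y hy
        have hxM : x ∈ M := hMc e hein x hxe (fun z hz hzx => hMk z (hall z hz hzx))
        rcases (PySem.Set.mem_union known e y).mp hy with hyk | hye
        · exact hMk y hyk
        · by_cases hyx : y = x
          · exact hyx ▸ hxM
          · exact hMk y (hall y hye hyx)
      · rw [if_neg hf]
        exact ih' known d hk

lemma pvFoldA_false (eqs : List (PySem.Set String)) :
    ∀ (st : PySem.Set String × Bool), st.2 = false →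
    (eqs.foldl
        (fun st e => if pvFire st.1 e then (PySem.Set.union st.1 e, false) else st)
        st).2 = false := by
  induction eqs with
  | nil => intro st h; simpa using h
  | cons e eqs ih =>
      intro st h
      simp only [List.foldl_cons]
      by_cases hf : pvFire st.1 e = true
      · rw [if_pos hf]; exact ih _ rfl
      · rw [if_neg hf]; exact ih st h

lemma pvFoldA_done (eqs : List (PySem.Set String)) :
    ∀ (known : List String) (d : Bool),
    (eqs.foldl
        (fun st e => if pvFire st.1 e then (PySem.Set.union st.1 e, false) else st)
        (known, d)).2 = true →
    (eqs.foldl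
        (fun st e => if pvFire st.1 e then (PySem.Set.union st.1 e, false) else st)
        (known, d)).1 = known ∧ ∀ e ∈ eqs, pvFire known e = false := by
  induction eqs with
  | nil =>
      intro known d _
      simp only [List.foldl_nil]
      refine ⟨by simp, ?_⟩
      intro e he
      simp at he
  | cons e eqs ih =>
      intro known d htrue
      simp only [List.foldl_cons] at htrue ⊢
      by_cases hf : pvFire known e = true
      · rw [if_pos hf] at htrue
        have := pvFoldA_false eqs (PySem.Set.union known e, false) rfl
        rw [this] at htrue
        cases htrue
      · rw [if_neg hf] at htrue ⊢
        obtain ⟨h1, h2⟩ := ih known d htrue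
        refine ⟨h1, fun e' he' => ?_⟩
        rcases List.mem_cons.mp he' with rfl | he''
        · exact Bool.eq_false_iff.mpr hf
        · exact h2 e' he''

lemma pvLoopA_char : ∀ (known : List String), known.Nodup →
    (pvLoopA known).Nodup ∧ (∀ x ∈ known, x ∈ pvLoopA known) ∧ pvClosed (pvLoopA known) ∧
    (∀ M, pvClosed M → (∀ x ∈ known, x ∈ M) → ∀ x ∈ pvLoopA known, x ∈ M) := by
  intro known
  induction known using pvLoopA.induct with
  | case1 known r hdone =>
      intro hk
      obtain ⟨heq, hnofire⟩ := pvFoldA_done pvEquations known true hdone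
      have hloop : pvLoopA known = known := by
        rw [pvLoopA, if_pos hdone]
        exact heq
      rw [hloop]
      exact ⟨hk, fun x hx => hx, pv_closed_of_nofire known hk hnofire,
        fun M _ hM x hx => hM x hx⟩
  | case2 known r hnd ih =>
      intro hk
      obtain ⟨h1, h2, h3⟩ := pvFoldA_main pvEquations (fun e he => he) known true hk
      obtain ⟨c1, c2, c3, c4⟩ := ih h1
      have hloop : pvLoopA known = pvLoopA (pvSweepA known).1 := by
        rw [pvLoopA, if_neg hnd]
      rw [hloop]
      exact ⟨c1, fun x hx => c2 x (h2 x hx), c3,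
        fun M hM hMk x hx => c4 M hM (fun y hy => h3 M hM hMk y hy) x hx⟩

-- worklist invariants for B
def pvInner (part : String) (rest : List (PySem.Set String)) (g s : List String) : Prop :=
  ∀ e ∈ pvEquations, ∀ x ∈ e, (∀ y ∈ e, y ≠ x → y ∈ g) →
    x ∈ g ∨ (∃ z ∈ s, z ∈ e) ∨ (part ∈ e ∧ e ∈ rest)

def pvOuter (g s : List String) : Prop :=
  ∀ e ∈ pvEquations, ∀ x ∈ e, (∀ y ∈ e, y ≠ x → y ∈ g) → x ∈ g ∨ (∃ z ∈ s, z ∈ e)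

lemma pv_singleton {l : List String} {x : String} (hnd : l.Nodup) (hx : x ∈ l)
    (hall : ∀ y ∈ l, y = x) : l = [x] := by
  cases l with
  | nil => cases hx
  | cons a t =>
      have ha : a = x := hall a (by simp)
      subst ha
      cases t with
      | nil => rfl
      | cons b t' =>
          have hb : b = a := hall b (by simp)
          rw [List.nodup_cons] at hnd
          exact absurd (hb ▸ (by simp : b ∈ b :: t')) hnd.1

lemma pvFoldB_main (eqs : List (PySem.Set String)) (hsub : ∀ e ∈ eqs, e ∈ pvEquations)
    (part : String) :
    ∀ (g s : List String), g.Nodup →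
    (eqs.foldl (pvStepB part) (g, s)).1.Nodup ∧
    (∀ x ∈ g, x ∈ (eqs.foldl (pvStepB part) (g, s)).1) ∧
    (∀ M, pvClosed M → (∀ x ∈ g, x ∈ M) →
        ∀ x ∈ (eqs.foldl (pvStepB part) (g, s)).1, x ∈ M) ∧
    (pvInner part eqs g s →
        pvInner part [] (eqs.foldl (pvStepB part) (g, s)).1 (eqs.foldl (pvStepB part) (g, s)).2) := by
  induction eqs with
  | nil =>
      intro g s hk
      simp only [List.foldl_nil]
      exact ⟨hk, fun x hx => hx, fun M _ hM x hx => hM x hx, fun h => h⟩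
  | cons e eqs ih =>
      intro g s hk
      have hein := hsub e (by simp)
      obtain ⟨hnd, hne, _⟩ := pv_eq_facts e hein
      have ih' := ih (fun e' he' => hsub e' (by simp [he']))
      simp only [List.foldl_cons]
      by_cases hc : e.contains part = true
      · by_cases hlen : ((PySem.Set.diff e g).length == 1) = true
        · rw [show pvStepB part (g, s) e =
            (PySem.Set.union g (PySem.Set.diff e g), PySem.Set.diff e g ++ s) from
            pvStepB_fire hc hlen]
          obtain ⟨m, hm⟩ := List.length_eq_one_iff.mp (by simpa using hlen)
          have hmd : m ∈ e ∧ m ∉ g := by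
            have hmem : m ∈ PySem.Set.diff e g := by simp [hm]
            unfold PySem.Set.diff at hmem
            rw [List.mem_filter] at hmem
            exact ⟨hmem.1, by simpa [List.contains_eq_mem] using hmem.2⟩
          have hsubU : ∀ y ∈ e, y ∈ PySem.Set.union g (PySem.Set.diff e g) := by
            intro y hy
            by_cases hyg : y ∈ g
            · exact (PySem.Set.mem_union _ _ y).mpr (Or.inl hyg)
            · refine (PySem.Set.mem_union _ _ y).mpr (Or.inr ?_)
              unfold PySem.Set.diff
              rw [List.mem_filter]
              exact ⟨hy, by simpa [List.contains_eq_mem] using hyg⟩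
          have hmono1 : ∀ x ∈ g, x ∈ PySem.Set.union g (PySem.Set.diff e g) :=
            fun x hx => (PySem.Set.mem_union _ _ x).mpr (Or.inl hx)
          have hothers : ∀ y ∈ e, y ≠ m → y ∈ g := by
            intro y hy hym
            by_cases hyg : y ∈ g
            · exact hyg
            · exfalso
              apply hym
              have : y ∈ PySem.Set.diff e g := by
                unfold PySem.Set.diff
                rw [List.mem_filter]
                exact ⟨hy, by simpa [List.contains_eq_mem] using hyg⟩
              rw [hm] at this
              simpa using this
          have hk' : (PySem.Set.union g (PySem.Set.diff e g)).Nodup :=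
            PySem.Set.nodup_union _ _ hk
          obtain ⟨h1, h2, h3, h4⟩ := ih' (PySem.Set.union g (PySem.Set.diff e g))
            (PySem.Set.diff e g ++ s) hk'
          refine ⟨h1, fun x hx => h2 x (hmono1 x hx), ?_, ?_⟩
          · intro M hMc hMg
            refine h3 M hMc ?_
            intro y hy
            have hmM : m ∈ M :=
              hMc e hein m hmd.1 (fun z hz hzm => hMg z (hothers z hz hzm))
            rcases (PySem.Set.mem_union _ _ y).mp hy with hyg | hyd
            · exact hMg y hyg
            · rw [hm] at hyd
              simp at hyd
              exact hyd ▸ hmM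
          · intro hI
            refine h4 ?_
            intro e' he' x hx hall
            by_cases hallg : ∀ y ∈ e', y ≠ x → y ∈ g
            · rcases hI e' he' x hx hallg with hxg | ⟨z, hzs, hze⟩ | ⟨hpe, hrest⟩
              · exact Or.inl (hmono1 x hxg)
              · exact Or.inr (Or.inl ⟨z, by simp [hzs], hze⟩)
              · rcases List.mem_cons.mp hrest with rfl | hrest'
                · exact Or.inl (hsubU x hx)
                · exact Or.inr (Or.inr ⟨hpe, hrest'⟩)
            · push Not at hallg
              obtain ⟨y, hye, hyx, hyg⟩ := hallg
              have hyU : y ∈ PySem.Set.union g (PySem.Set.diff e g) := hall y hye hyx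
              rcases (PySem.Set.mem_union _ _ y).mp hyU with h | h
              · exact absurd h hyg
              · rw [hm] at h
                simp at h
                subst h
                exact Or.inr (Or.inl ⟨y, by simp [hm], hye⟩)
        · rw [show pvStepB part (g, s) e = (g, s) from
            pvStepB_skip (Or.inr (by simpa using hlen))]
          obtain ⟨h1, h2, h3, h4⟩ := ih' g s hk
          refine ⟨h1, h2, h3, fun hI => h4 ?_⟩
          intro e' he' x hx hall
          rcases hI e' he' x hx hall with hxg | hzs | ⟨hpe, hrest⟩
          · exact Or.inl hxg
          · exact Or.inr (Or.inl hzs)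
          · rcases List.mem_cons.mp hrest with rfl | hrest'
            · -- head equation with all-but-x known but not fired: x must be known
              by_cases hxg : x ∈ g
              · exact Or.inl hxg
              · exfalso
                have hdiff : PySem.Set.diff e' g = [x] := by
                  apply pv_singleton (PySem.Set.nodup_diff _ _ hnd)
                  · unfold PySem.Set.diff
                    rw [List.mem_filter]
                    exact ⟨hx, by simpa [List.contains_eq_mem] using hxg⟩
                  · intro y hy
                    unfold PySem.Set.diff at hy
                    rw [List.mem_filter] at hy
                    have hyg : y ∉ g := by simpa [List.contains_eq_mem] using hy.2
                    by_contra hyx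
                    exact hyg (hall y hy.1 hyx)
                rw [hdiff] at hlen
                simp at hlen
            · exact Or.inr (Or.inr ⟨hpe, hrest'⟩)
      · rw [show pvStepB part (g, s) e = (g, s) from
          pvStepB_skip (Or.inl (by simpa using hc))]
        obtain ⟨h1, h2, h3, h4⟩ := ih' g s hk
        refine ⟨h1, h2, h3, fun hI => h4 ?_⟩
        intro e' he' x hx hall
        rcases hI e' he' x hx hall with hxg | hzs | ⟨hpe, hrest⟩
        · exact Or.inl hxg
        · exact Or.inr (Or.inl hzs)
        · rcases List.mem_cons.mp hrest with rfl | hrest'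
          · exact absurd hpe (by simpa [List.contains_eq_mem] using hc)
          · exact Or.inr (Or.inr ⟨hpe, hrest'⟩)

lemma pvOuter_inner {g : List String} {part : String} {rest : List String}
    (h : pvOuter g (part :: rest)) : pvInner part pvEquations g rest := by
  intro e he x hx hall
  rcases h e he x hx hall with hxg | ⟨z, hzs, hze⟩
  · exact Or.inl hxg
  · rcases List.mem_cons.mp hzs with rfl | hzs'
    · exact Or.inr (Or.inr ⟨hze, he⟩)
    · exact Or.inr (Or.inl ⟨z, hzs', hze⟩)

lemma pvInner_outer {g s : List String} {part : String}
    (h : pvInner part [] g s) : pvOuter g s := by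
  intro e he x hx hall
  rcases h e he x hx hall with hxg | hzs | ⟨_, hrest⟩
  · exact Or.inl hxg
  · exact Or.inr hzs
  · simp at hrest

lemma pvLoopB_char : ∀ (g s : List String), g.Nodup → pvOuter g s →
    (pvLoopB g s).Nodup ∧ (∀ x ∈ g, x ∈ pvLoopB g s) ∧ pvClosed (pvLoopB g s) ∧
    (∀ M, pvClosed M → (∀ x ∈ g, x ∈ M) → ∀ x ∈ pvLoopB g s, x ∈ M) := by
  intro g s
  induction g, s using pvLoopB.induct with
  | case1 g =>
      intro hk hOut
      have hloop : pvLoopB g [] = g := by rw [pvLoopB]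
      rw [hloop]
      refine ⟨hk, fun x hx => hx, ?_, fun M _ hM x hx => hM x hx⟩
      intro e he x hx hall
      rcases hOut e he x hx hall with hxg | ⟨z, hzs, _⟩
      · exact hxg
      · simp at hzs
  | case2 g part rest r ih =>
      intro hk hOut
      obtain ⟨h1, h2, h3, h4⟩ := pvFoldB_main pvEquations (fun e he => he) part g rest hk
      have hInner := h4 (pvOuter_inner hOut)
      obtain ⟨c1, c2, c3, c4⟩ := ih h1 (pvInner_outer hInner)
      have hloop : pvLoopB g (part :: rest) =
          pvLoopB (pvEquations.foldl (pvStepB part) (g, rest)).1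
            (pvEquations.foldl (pvStepB part) (g, rest)).2 := by
        rw [pvLoopB]
      rw [hloop]
      exact ⟨c1, fun x hx => c2 x (h2 x hx), c3,
        fun M hM hMk x hx => c4 M hM (fun y hy => h3 M hM hMk y hy) x hx⟩

-- ===== VERDICT =====
theorem can_find_parameters_from_py_spec : Claim_equal_can_find_parameters_from_py := by
  intro given_parts _ hPre
  unfold Spec_can_find_parameters_from_py
  unfold can_find_parameters_from_py can_find_parameters_from_py_alt
  have hOuter0 : pvOuter given_parts given_parts.reverse := by
    intro e he x hx hall
    by_cases hxg : x ∈ given_parts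
    · exact Or.inl hxg
    · obtain ⟨y, hye, hyx⟩ := pv_eq_facts2 e he x hx
      exact Or.inr ⟨y, List.mem_reverse.mpr (hall y hye hyx), hye⟩
  obtain ⟨hA1, hA2, hA3, hA4⟩ := pvLoopA_char given_parts hPre
  obtain ⟨hB1, hB2, hB3, hB4⟩ := pvLoopB_char given_parts given_parts.reverse hPre hOuter0
  have hmem : ∀ x, x ∈ pvLoopA given_parts ↔ x ∈ pvLoopB given_parts given_parts.reverse := by
    intro x
    exact ⟨fun hx => hA4 _ hB3 hB2 x hx, fun hx => hB4 _ hA3 hA2 x hx⟩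
  have hperm := (List.perm_ext_iff_of_nodup hA1 hB1).mpr hmem
  rw [hperm.length_eq]
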